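-- pv_equiv track=rewrite | github.com/fick1udd/try_box | self_powers.py | rel_int_to_str
-- ===== SOURCE A (Python) =====
-- def rel_int_to_str(n, digs):
--     """
--     convert numbers in n to string digits in a list
--
--     :param n: integer to be converted to single digit numbers in string format
--     :type n: int
--     :param digs: integer representing the number of digits that are relevant and therefore converted
--     :type digs: int
--     :return: list of digs number of single digit numbers in string format
--     :rtype: list
--     """
--
--     nstr = []
--     for i in range(0, digs):
--         dign = n % 10
--         if n > 0:
--             nstr.append(str(dign))
--         n //= 10
--
--     nstr.reverse()
--     return nstr
-- ===== SOURCE B (Python) =====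
-- def rel_int_to_str(n, digs):
--     """
--     convert numbers in n to string digits in a list
--
--     :param n: integer to be converted to single digit numbers in string format
--     :type n: int
--     :param digs: integer representing the number of digits that are relevant and therefore converted
--     :type digs: int
--     :return: list of digs number of single digit numbers in string format
--     :rtype: list
--     """
--     if n > 0 and digs > 0:
--         return list(str(n)[-digs:])
--     return []
-- ===== Notes on version B (the rewrite author's own statement) =====
-- stated objective: idiomatic
-- what changed: Replaces A's digs-iteration %10,//10 digit-extraction loop with append-and-reverse by a guard plus a single str(n)[-digs:] decimal-string slice listed into characters.
import Mathlib
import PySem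

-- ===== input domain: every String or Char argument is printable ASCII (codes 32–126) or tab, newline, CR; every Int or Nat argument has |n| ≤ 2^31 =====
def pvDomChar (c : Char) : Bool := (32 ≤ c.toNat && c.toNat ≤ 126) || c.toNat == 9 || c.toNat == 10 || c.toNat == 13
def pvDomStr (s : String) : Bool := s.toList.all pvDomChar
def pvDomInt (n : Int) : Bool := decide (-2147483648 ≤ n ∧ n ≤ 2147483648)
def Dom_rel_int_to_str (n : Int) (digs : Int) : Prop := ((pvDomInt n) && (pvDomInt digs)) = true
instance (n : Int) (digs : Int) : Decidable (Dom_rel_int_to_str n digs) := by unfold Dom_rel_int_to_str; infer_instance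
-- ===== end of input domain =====

-- B replaces A's %10 / //10 digit-extraction loop (digs iterations) by converting n
-- to its decimal string once and slicing off the last digs characters (idiomatic).

-- ===== PORT A =====
-- literal transliteration of A's loop: state (n, nstr), digs iterations, then reverse
def rel_int_to_str (n : Int) (digs : Int) : List String :=
  let st := (PySem.List.pyRange 0 digs 1).foldl
    (fun (st : Int × List String) (_ : Int) =>
      let dign := PySem.Int.mod st.1 10
      let nstr := if st.1 > 0 then st.2 ++ [PySem.Int.toStr dign] else st.2
      (PySem.Int.floordiv st.1 10, nstr))
    (n, [])
  st.2.reverse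

-- ===== PORT B =====
-- literal transliteration of B: list(str(n)[-digs:]) behind the guard, else []
-- (string slicing/char listing done on the char list of str(n); exact for Python str)
def rel_int_to_str_alt (n : Int) (digs : Int) : List String :=
  if n > 0 ∧ digs > 0 then
    (PySem.List.slice (PySem.Int.toStr n).toList (some (-digs)) none).map
      (fun c => String.ofList [c])
  else []

-- ===== PRECONDITION & SPEC =====
def Spec_rel_int_to_str (n : Int) (digs : Int) (out : List String) : Prop := out = rel_int_to_str_alt n digs
instance (n : Int) (digs : Int) (out : List String) : Decidable (Spec_rel_int_to_str n digs out) := by unfold Spec_rel_int_to_str; infer_instance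

-- ===== CLAIM (what is proved, stated in full; the proofs are below) =====
def Claim_equal_rel_int_to_str : Prop := ∀ (n : Int) (digs : Int), Dom_rel_int_to_str n digs → Spec_rel_int_to_str n digs (rel_int_to_str n digs)

-- ===== LEMMAS AND PROOFS =====

-- A's loop body, iterated d times (the foldl over pyRange ignores the index)
def pvStepA (st : Int × List String) : Int × List String :=
  let dign := PySem.Int.mod st.1 10
  let nstr := if st.1 > 0 then st.2 ++ [PySem.Int.toStr dign] else st.2
  (PySem.Int.floordiv st.1 10, nstr)

def pvLoopA : Nat → Int × List String → Int × List String
  | 0, st => st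
  | d + 1, st => pvLoopA d (pvStepA st)

theorem pvFoldl_const (xs : List Int) (st : Int × List String) :
    xs.foldl (fun s (_ : Int) => pvStepA s) st = pvLoopA xs.length st := by
  induction xs generalizing st with
  | nil => rfl
  | cons x xs ih => simp [pvLoopA, ih]

theorem portA_eq (n digs : Int) :
    rel_int_to_str n digs = (pvLoopA (PySem.List.pyRange 0 digs 1).length (n, [])).2.reverse := by
  unfold rel_int_to_str
  exact congrArg (fun p : Int × List String => p.2.reverse) (pvFoldl_const _ _)

-- the loop appends nothing once n ≤ 0
theorem pvLoopA_inert (d : Nat) (n : Int) (acc : List String) (h : n ≤ 0) :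
    (pvLoopA d (n, acc)).2 = acc := by
  induction d generalizing n acc with
  | zero => rfl
  | succ d ih =>
      have h' : PySem.Int.floordiv n 10 ≤ 0 := by
        rw [PySem.Int.floordiv_eq_ediv_of_pos (by omega)]; omega
      simpa [pvLoopA, pvStepA, not_lt.mpr h, Int.not_lt.mpr h] using ih _ _ h'

-- fuel irrelevance for Nat.toDigitsCore (2 ≤ b)
theorem pvToDigitsCore_fuel (b : Nat) (hb : 2 ≤ b) :
    ∀ n f l, n < f → Nat.toDigitsCore b f n l = Nat.toDigitsCore b (n + 1) n l := by
  intro n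
  induction n using Nat.strong_induction_on with
  | _ n ih =>
    intro f l hf
    match f with
    | f + 1 =>
      simp only [Nat.toDigitsCore]
      by_cases h : n / b = 0
      · simp [h]
      · simp only [h, if_false]
        have hn0 : 0 < n := by
          rcases Nat.eq_zero_or_pos n with h0 | h0
          · exact absurd (by simp [h0]) h
          · exact h0
        have hnb : n / b < n := Nat.div_lt_self hn0 hb
        rw [ih (n / b) hnb f _ (by omega), ih (n / b) hnb n _ (by omega)]

-- accumulator lemma for Nat.toDigitsCore
theorem pvToDigitsCore_acc (b : Nat) :
    ∀ f n l, Nat.toDigitsCore b f n l = Nat.toDigitsCore b f n [] ++ l := by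
  intro f
  induction f with
  | zero => simp [Nat.toDigitsCore]
  | succ f ih =>
    intro n l
    simp only [Nat.toDigitsCore]
    by_cases h : n / b = 0
    · simp [h]
    · simp only [h, if_false]
      rw [ih (n / b) (Nat.digitChar (n % b) :: l), ih (n / b) [Nat.digitChar (n % b)]]
      simp

theorem pvToDigits_small (m : Nat) (h : m < 10) :
    Nat.toDigits 10 m = [Nat.digitChar m] := by
  simp [Nat.toDigits, Nat.toDigitsCore, Nat.div_eq_of_lt h, Nat.mod_eq_of_lt h]

theorem pvToDigits_rec (m : Nat) (h : 10 ≤ m) :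
    Nat.toDigits 10 m = Nat.toDigits 10 (m / 10) ++ [Nat.digitChar (m % 10)] := by
  have hd : m / 10 ≠ 0 := by
    have : 0 < m / 10 := Nat.div_pos h (by omega); omega
  conv_lhs => rw [Nat.toDigits]
  show Nat.toDigitsCore 10 (m + 1) m [] = _
  simp only [Nat.toDigitsCore, hd, if_false]
  rw [pvToDigitsCore_fuel 10 (by omega) (m / 10) m _ (by omega)]
  rw [pvToDigitsCore_acc 10 (m / 10 + 1) (m / 10) [Nat.digitChar (m % 10)]]
  rfl

-- str of a single decimal digit (as Int) is that digit's char
theorem pvToStr_digit (k : Nat) (h : k < 10) :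
    PySem.Int.toStr ((k : Int)) = String.ofList [Nat.digitChar k] := by
  interval_cases k <;> decide

-- main invariant: for positive m, d iterations append the last d digits, least significant first
theorem pvLoopA_pos (d : Nat) :
    ∀ (m : Nat) (acc : List String), 0 < m →
    (pvLoopA d ((m : Int), acc)).2 =
      acc ++ (((Nat.toDigits 10 m).map (fun c => String.ofList [c])).reverse.take d) := by
  induction d with
  | zero => intro m acc _; simp [pvLoopA]
  | succ d ih =>
    intro m acc hm
    have hpos : (0 : Int) < (m : Int) := by exact_mod_cast hm
    have hmod : PySem.Int.mod (m : Int) 10 = ((m % 10 : Nat) : Int) :=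
      PySem.Int.mod_natCast m 10
    have hdiv : PySem.Int.floordiv (m : Int) 10 = ((m / 10 : Nat) : Int) :=
      PySem.Int.floordiv_natCast m 10
    have hstep : pvStepA ((m : Int), acc) =
        (((m / 10 : Nat) : Int), acc ++ [String.ofList [Nat.digitChar (m % 10)]]) := by
      simp only [pvStepA, hmod, hdiv, if_pos hpos]
      rw [pvToStr_digit (m % 10) (Nat.mod_lt m (by omega))]
    by_cases h10 : m < 10
    · -- last iteration that appends: m / 10 = 0, the rest of the loop is inert
      have hdz : m / 10 = 0 := Nat.div_eq_of_lt h10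
      show (pvLoopA d (pvStepA ((m : Int), acc))).2 = _
      rw [hstep, hdz, Nat.mod_eq_of_lt h10]
      push_cast
      rw [pvLoopA_inert d 0 _ le_rfl, pvToDigits_small m h10]
      simp
    · -- m ≥ 10: peel the least significant digit and use the IH on m / 10
      show (pvLoopA d (pvStepA ((m : Int), acc))).2 = _
      rw [hstep, ih (m / 10) _ (by omega : 0 < m / 10)]
      rw [pvToDigits_rec m (by omega)]
      simp [List.take_succ_cons, List.append_assoc]

-- ===== VERDICT (by name: the statement is the Claim_ definition above) =====
theorem rel_int_to_str_spec : Claim_equal_rel_int_to_str := by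
  intro n digs _
  unfold Spec_rel_int_to_str rel_int_to_str_alt
  rw [portA_eq]
  by_cases hn : 0 < n
  · by_cases hd : 0 < digs
    · -- positive n, positive digs
      obtain ⟨m, rfl⟩ : ∃ m : Nat, n = (m : Int) := ⟨n.toNat, (Int.toNat_of_nonneg (by omega)).symm⟩
      obtain ⟨d, rfl⟩ : ∃ k : Nat, digs = (k : Int) := ⟨digs.toNat, (Int.toNat_of_nonneg (by omega)).symm⟩
      have hm : 0 < m := by exact_mod_cast hn
      have hlen : (PySem.List.pyRange 0 (d : Int) 1).length = d := by
        rw [PySem.List.length_pyRange_one]; simp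
      rw [hlen, pvLoopA_pos d m [] hm]
      rw [if_pos ⟨hn, hd⟩]
      have hd' : 0 < d := by exact_mod_cast hd
      rw [PySem.Int.toList_toStr]
      have htc : PySem.Int.toChars (m : Int) = Nat.toDigits 10 m := by
        simp [PySem.Int.toChars, not_lt.mpr (by positivity : (0:Int) ≤ (m:Int))]
      rw [htc, PySem.List.slice_from_neg_natCast _ d hd']
      simp [List.take_reverse, List.map_drop]
    · -- digs ≤ 0: the loop runs zero times
      have hnil : PySem.List.pyRange 0 digs 1 = [] := PySem.List.pyRange_one_eq_nil (by omega)
      rw [hnil]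
      simp [pvLoopA]
      intro _ h2
      exact absurd h2 hd
  · -- n ≤ 0: the loop never appends
    rw [pvLoopA_inert _ n [] (by omega)]
    simp only [List.reverse_nil]
    rw [if_neg (fun h : n > 0 ∧ digs > 0 => hn h.1)]
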